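-- pv_equiv track=rewrite | github.com/Gioela/PNG_Decoders | Python/pyokaganutils.py | get_IDATA_pixel
-- ===== SOURCE A (Python) =====
-- def _paethPredictor(a, b, c):
--     p = a + b - c
--     pa = abs(p - a)
--     pb = abs(p - b)
--     pc = abs(p - c)
--     if pa <= pb and pa <= pc:
--         Pr = a
--     elif pb <= pc:
--         Pr = b
--     else:
--         Pr = c
--     return Pr
--
-- def _recon_a(recon, stride, r, c, bytes_4_pixel):
--     return recon[r * stride + c - bytes_4_pixel] if c >= bytes_4_pixel else 0
--
-- def _recon_b(recon, stride, r, c):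
--     return recon[(r-1) * stride + c] if r > 0 else 0
--
-- def _recon_c(recon, stride, r, c, bytes_4_pixel):
--     return recon[(r-1) * stride + c - bytes_4_pixel] if r > 0 and c >= bytes_4_pixel else 0
--
-- def get_IDATA_pixel(IDAT, width, height, bytes_4_pixel = 4):
--     recon = []
--     stride = width * bytes_4_pixel
--
--     i = 0
--     for r in range(height): # for each scanline
--         filter_type = IDAT[i] # first byte of scanline is filter type
--         i += 1
--         for c in range(stride): # for each byte in scanline
--             Filt_x = IDAT[i]
--             i += 1
--             if filter_type == 0: # None
--                 Recon_x = Filt_x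
--             elif filter_type == 1: # Sub
--                 Recon_x = Filt_x + _recon_a(recon, stride, r, c, bytes_4_pixel)
--             elif filter_type == 2: # Up
--                 Recon_x = Filt_x + _recon_b(recon, stride, r, c)
--             elif filter_type == 3: # Average
--                 Recon_x = Filt_x + (_recon_a(recon, stride, r, c, bytes_4_pixel) +
--                                     _recon_b(recon, stride, r, c)
--                                     ) // 2
--             elif filter_type == 4: # Paeth
--                 Recon_x = Filt_x + _paethPredictor( _recon_a(recon, stride, r, c, bytes_4_pixel),
--                                                     _recon_b(recon, stride, r, c),
--                                                     _recon_c(recon, stride, r, c, bytes_4_pixel) )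
--             else:
--                 raise Exception('unknown filter type: ' + str(filter_type))
--             recon.append(Recon_x & 0xff) # truncation to byte
--     return recon
-- ===== SOURCE B (Python) =====
-- def get_IDATA_pixel(IDAT, width, height, bytes_4_pixel=4):
--     stride = width * bytes_4_pixel
--
--     # stage 1: split the IDAT stream into (filter_type, raw_scanline) pairs
--     scanlines = []
--     i = 0
--     for _ in range(height):
--         ft = IDAT[i]
--         raw = [IDAT[i + 1 + c] for c in range(stride)]
--         scanlines.append((ft, raw))
--         i += 1 + len(raw)
--
--     def row_none(raw, prev, bpp):
--         return [x & 0xff for x in raw]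
--
--     def row_sub(raw, prev, bpp):
--         out = []
--         for c, x in enumerate(raw):
--             a = out[c - bpp] if c >= bpp else 0
--             out.append((x + a) & 0xff)
--         return out
--
--     def row_up(raw, prev, bpp):
--         return [(x + p) & 0xff for x, p in zip(raw, prev)]
--
--     def row_avg(raw, prev, bpp):
--         out = []
--         for c, x in enumerate(raw):
--             a = out[c - bpp] if c >= bpp else 0
--             out.append((x + (a + prev[c]) // 2) & 0xff)
--         return out
--
--     def row_paeth(raw, prev, bpp):
--         out = []
--         for c, x in enumerate(raw):
--             a = out[c - bpp] if c >= bpp else 0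
--             b = prev[c]
--             cc = prev[c - bpp] if c >= bpp else 0
--             p = a + b - cc
--             pa, pb, pc = abs(p - a), abs(p - b), abs(p - cc)
--             pr = a if pa <= pb and pa <= pc else (b if pb <= pc else cc)
--             out.append((x + pr) & 0xff)
--         return out
--
--     dispatch = {0: row_none, 1: row_sub, 2: row_up, 3: row_avg, 4: row_paeth}
--
--     # stage 2: defilter row by row against a virtual zero row above the image
--     recon = []
--     if not scanlines:
--         return recon
--     prev = [0] * stride
--     for ft, raw in scanlines:
--         f = dispatch.get(ft)
--         if f is None:
--             raise ValueError('unknown filter type: ' + str(ft))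
--         prev = f(raw, prev, bytes_4_pixel)
--         recon.extend(prev)
--     return recon
-- ===== Notes on version B (the rewrite author's own statement) =====
-- stated objective: alternative
-- what changed: B replaces A's single per-byte loop (five filter branches tested on every byte, neighbours fetched from one flat list via r*stride+c offset helpers) with two stages: it first parses the IDAT stream into (filter_type, raw_scanline) pairs, then defilters row by row through a filter->row-function dispatch table of five specialised row defilters, threading a virtual zero previous row so the r>0 branches disappear.
-- outside the precondition, e.g. on get_IDATA_pixel([9], 0, 1, 0): A returns [], B raises ValueError; on get_IDATA_pixel([0, 7, 7], -1, 1, -2): A returns [7, 7], B returns [7, 7]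
import Mathlib
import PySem

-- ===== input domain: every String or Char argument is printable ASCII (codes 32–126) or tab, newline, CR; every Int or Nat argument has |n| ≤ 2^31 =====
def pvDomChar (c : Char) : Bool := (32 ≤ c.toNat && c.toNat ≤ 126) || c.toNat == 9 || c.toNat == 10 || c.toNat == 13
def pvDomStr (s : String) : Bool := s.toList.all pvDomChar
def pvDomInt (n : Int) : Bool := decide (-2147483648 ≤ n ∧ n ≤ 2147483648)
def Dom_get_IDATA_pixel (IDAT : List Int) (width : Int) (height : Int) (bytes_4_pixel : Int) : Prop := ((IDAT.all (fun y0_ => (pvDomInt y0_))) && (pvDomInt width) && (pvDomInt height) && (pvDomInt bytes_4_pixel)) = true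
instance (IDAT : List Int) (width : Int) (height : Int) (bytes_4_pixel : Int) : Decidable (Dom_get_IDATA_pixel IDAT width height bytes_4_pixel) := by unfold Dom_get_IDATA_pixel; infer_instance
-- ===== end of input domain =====

-- B restructures A's flat per-byte defilter loop into two stages: parse the IDAT stream into
-- (filter_type, raw_scanline) pairs, then defilter row by row through a dispatch to five specialised
-- row-defilter functions against a virtual zero previous row; same output, same cost (objective: alternative).

-- ===== PORT A =====
def pvPaeth (a b c : Int) : Int :=
  let p := a + b - c
  let pa := |p - a|
  let pb := |p - b|
  let pc := |p - c|
  if pa ≤ pb ∧ pa ≤ pc then a else if pb ≤ pc then b else c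

-- recon reads: inside Pre_ every index is a valid nonnegative index, where pyGet?.getD 0 = Python recon[...]
def pvReconA (recon : List Int) (stride r c bpp : Int) : Int :=
  if c ≥ bpp then (PySem.List.pyGet? recon (r * stride + c - bpp)).getD 0 else 0
def pvReconB (recon : List Int) (stride r c : Int) : Int :=
  if r > 0 then (PySem.List.pyGet? recon ((r - 1) * stride + c)).getD 0 else 0
def pvReconC (recon : List Int) (stride r c bpp : Int) : Int :=
  if r > 0 ∧ c ≥ bpp then (PySem.List.pyGet? recon ((r - 1) * stride + c - bpp)).getD 0 else 0

-- one byte of a scanline; IDAT.getD st.2 0 = Python IDAT[i] inside Pre_ (index in range)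
def pvAstep (IDAT : List Int) (stride bpp ft : Int) (r : Nat) (st : List Int × Nat) (c : Nat) : List Int × Nat :=
  let fx := IDAT.getD st.2 0
  let rx :=
    if ft = 0 then fx
    else if ft = 1 then fx + pvReconA st.1 stride (r : Int) (c : Int) bpp
    else if ft = 2 then fx + pvReconB st.1 stride (r : Int) (c : Int)
    else if ft = 3 then fx + PySem.Int.floordiv (pvReconA st.1 stride (r : Int) (c : Int) bpp + pvReconB st.1 stride (r : Int) (c : Int)) 2
    else if ft = 4 then fx + pvPaeth (pvReconA st.1 stride (r : Int) (c : Int) bpp) (pvReconB st.1 stride (r : Int) (c : Int)) (pvReconC st.1 stride (r : Int) (c : Int) bpp)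
    else 0  -- Python raises here (unknown filter type); excluded by Pre_
  (st.1 ++ [PySem.Int.mod rx 256], st.2 + 1)  -- rx & 0xff = rx mod 256

def pvArow (IDAT : List Int) (stride bpp : Int) (st : List Int × Nat) (r : Nat) : List Int × Nat :=
  let ft := IDAT.getD st.2 0
  List.foldl (pvAstep IDAT stride bpp ft r) (st.1, st.2 + 1) (List.range stride.toNat)

def get_IDATA_pixel (IDAT : List Int) (width : Int) (height : Int) (bytes_4_pixel : Int) : List Int :=
  let stride := width * bytes_4_pixel
  (List.foldl (pvArow IDAT stride bytes_4_pixel) (([] : List Int), 0) (List.range height.toNat)).1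

-- ===== PORT B =====
-- stage 1: split the IDAT stream into (filter_type, raw_scanline) pairs
def pvParseRow (IDAT : List Int) (stride : Int) (st : List (Int × List Int) × Nat) (_r : Nat) :
    List (Int × List Int) × Nat :=
  let ft := IDAT.getD st.2 0
  let raw := (List.range stride.toNat).map (fun c => IDAT.getD (st.2 + 1 + c) 0)
  (st.1 ++ [(ft, raw)], st.2 + 1 + raw.length)

-- five specialised row defilters; prev is always a full previous row (zeros above the image)
def pvRowNone (raw prev : List Int) (bpp : Int) : List Int :=
  raw.map (fun x => PySem.Int.mod x 256)

def pvRowSub (raw prev : List Int) (bpp : Int) : List Int :=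
  List.foldl (fun out (cx : Int × Int) =>
      let a := if cx.1 ≥ bpp then (PySem.List.pyGet? out (cx.1 - bpp)).getD 0 else 0
      out ++ [PySem.Int.mod (cx.2 + a) 256])
    [] (PySem.List.enumerate raw 0)

def pvRowUp (raw prev : List Int) (bpp : Int) : List Int :=
  (raw.zip prev).map (fun xp => PySem.Int.mod (xp.1 + xp.2) 256)

def pvRowAvg (raw prev : List Int) (bpp : Int) : List Int :=
  List.foldl (fun out (cx : Int × Int) =>
      let a := if cx.1 ≥ bpp then (PySem.List.pyGet? out (cx.1 - bpp)).getD 0 else 0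
      out ++ [PySem.Int.mod (cx.2 + PySem.Int.floordiv (a + (PySem.List.pyGet? prev cx.1).getD 0) 2) 256])
    [] (PySem.List.enumerate raw 0)

def pvRowPaeth (raw prev : List Int) (bpp : Int) : List Int :=
  List.foldl (fun out (cx : Int × Int) =>
      let a := if cx.1 ≥ bpp then (PySem.List.pyGet? out (cx.1 - bpp)).getD 0 else 0
      let b := (PySem.List.pyGet? prev cx.1).getD 0
      let cc := if cx.1 ≥ bpp then (PySem.List.pyGet? prev (cx.1 - bpp)).getD 0 else 0
      let p := a + b - cc
      let pa := |p - a|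
      let pb := |p - b|
      let pc := |p - cc|
      out ++ [PySem.Int.mod (cx.2 + (if pa ≤ pb ∧ pa ≤ pc then a else if pb ≤ pc then b else cc)) 256])
    [] (PySem.List.enumerate raw 0)

-- stage 2: defilter one scanline, dispatching on its filter type
def pvDefilterRow (bpp : Int) (st : List Int × List Int) (sl : Int × List Int) :
    List Int × List Int :=
  let row :=
    if sl.1 = 0 then pvRowNone sl.2 st.2 bpp
    else if sl.1 = 1 then pvRowSub sl.2 st.2 bpp
    else if sl.1 = 2 then pvRowUp sl.2 st.2 bpp
    else if sl.1 = 3 then pvRowAvg sl.2 st.2 bpp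
    else if sl.1 = 4 then pvRowPaeth sl.2 st.2 bpp
    else []  -- Python raises ValueError here (unknown filter type); excluded by Pre_
  (st.1 ++ row, row)

def get_IDATA_pixel_alt (IDAT : List Int) (width : Int) (height : Int) (bytes_4_pixel : Int) : List Int :=
  let stride := width * bytes_4_pixel
  let scanlines :=
    (List.foldl (pvParseRow IDAT stride) (([] : List (Int × List Int)), 0) (List.range height.toNat)).1
  if scanlines = [] then []
  else
    (List.foldl (pvDefilterRow bytes_4_pixel)
      (([] : List Int), List.replicate stride.toNat 0) scanlines).1

-- ===== PRECONDITION & SPEC =====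
-- Pre_ excludes (a) inputs where A raises: IDAT too short for height scanlines, or a filter-type
-- byte outside 0..4 read at the head of a non-empty scanline; (b) inputs where A returns but B's own
-- algorithm raises: an unknown filter byte on a degenerate (empty) scanline, which A never inspects
-- but B's dispatch validates, and a negative width or bytes_4_pixel whose product is positive, where
-- A's flat negative-offset indexing happens to return on filter types 0/2 (B returns the same value
-- there, see cites, but the claim does not cover it).
def Pre_get_IDATA_pixel (IDAT : List Int) (width : Int) (height : Int) (bytes_4_pixel : Int) : Prop :=
  height ≤ 0 ∨
    (width * bytes_4_pixel ≤ 0 ∧ height ≤ (IDAT.length : Int) ∧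
      ∀ r ∈ List.range height.toNat,
        0 ≤ IDAT.getD r 0 ∧ IDAT.getD r 0 ≤ 4) ∨
    (0 ≤ width ∧ 0 ≤ bytes_4_pixel ∧
      height * (1 + width * bytes_4_pixel) ≤ (IDAT.length : Int) ∧
      ∀ r ∈ List.range height.toNat,
        0 ≤ IDAT.getD (r * (1 + (width * bytes_4_pixel).toNat)) 0 ∧
        IDAT.getD (r * (1 + (width * bytes_4_pixel).toNat)) 0 ≤ 4)
instance (IDAT : List Int) (width : Int) (height : Int) (bytes_4_pixel : Int) : Decidable (Pre_get_IDATA_pixel IDAT width height bytes_4_pixel) := by unfold Pre_get_IDATA_pixel; infer_instance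

def pvWitness_get_IDATA_pixel : List Int × Int × Int × Int := ([1, 5, 6, 2, 7, 8], 1, 2, 2)

def Spec_get_IDATA_pixel (IDAT : List Int) (width : Int) (height : Int) (bytes_4_pixel : Int) (out : List Int) : Prop := out = get_IDATA_pixel_alt IDAT width height bytes_4_pixel
instance (IDAT : List Int) (width : Int) (height : Int) (bytes_4_pixel : Int) (out : List Int) : Decidable (Spec_get_IDATA_pixel IDAT width height bytes_4_pixel out) := by unfold Spec_get_IDATA_pixel; infer_instance

-- ===== CLAIM (what is proved, stated in full; the proofs are below) =====
def Claim_equal_get_IDATA_pixel : Prop := ∀ (IDAT : List Int) (width : Int) (height : Int) (bytes_4_pixel : Int), Dom_get_IDATA_pixel IDAT width height bytes_4_pixel → Pre_get_IDATA_pixel IDAT width height bytes_4_pixel → Spec_get_IDATA_pixel IDAT width height bytes_4_pixel (get_IDATA_pixel IDAT width height bytes_4_pixel)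

-- ===== LEMMAS AND PROOFS =====

-- generic step used only by the proofs: one byte of a row, reading raw by index (the common
-- shape both A's inner loop and B's five row functions reduce to)
def pvGstep (raw prev : List Int) (bpp ft : Int) (out : List Int) (c : Nat) : List Int :=
  let fx := raw.getD c 0
  let a := if (c : Int) ≥ bpp then (PySem.List.pyGet? out ((c : Int) - bpp)).getD 0 else 0
  let b := (PySem.List.pyGet? prev (c : Int)).getD 0
  let cc := if (c : Int) ≥ bpp then (PySem.List.pyGet? prev ((c : Int) - bpp)).getD 0 else 0
  let x :=
    if ft = 0 then fx
    else if ft = 1 then fx + a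
    else if ft = 2 then fx + b
    else if ft = 3 then fx + PySem.Int.floordiv (a + b) 2
    else if ft = 4 then fx + pvPaeth a b cc
    else 0
  out ++ [PySem.Int.mod x 256]

theorem pvGstep_shape (raw prev : List Int) (bpp ft : Int) (out : List Int) (c : Nat) :
    ∃ e, pvGstep raw prev bpp ft out c = out ++ [e] := ⟨_, rfl⟩

theorem pvG_len (raw prev : List Int) (bpp ft : Int) :
    ∀ (k c : Nat) (cur : List Int),
      (List.foldl (pvGstep raw prev bpp ft) cur (List.range' c k)).length = cur.length + k := by
  intro k
  induction k with
  | zero => intro c cur; simp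
  | succ k ih =>
    intro c cur
    rw [List.range'_succ, List.foldl_cons]
    obtain ⟨e, h⟩ := pvGstep_shape raw prev bpp ft cur c
    rw [h, ih]
    simp
    omega

-- bridge: a fold over Python's enumerate(raw) is a fold over indices reading raw by getD
theorem fold_enum_eq_range (g : List Int → Int → Int → List Int) :
    ∀ (raw : List Int) (k : Nat) (init : List Int),
      List.foldl (fun out cx => g out cx.1 cx.2) init (PySem.List.enumerate raw (k : Int))
        = List.foldl (fun out (c : Nat) => g out (c : Int) (raw.getD (c - k) 0)) init (List.range' k raw.length) := by
  intro raw
  induction raw with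
  | nil => intro k init; simp [PySem.List.enumerate_nil]
  | cons x rest ih =>
    intro k init
    rw [PySem.List.enumerate_cons, List.foldl_cons]
    have hk1 : ((k : Int) + 1) = ((k + 1 : Nat) : Int) := by push_cast; ring
    rw [hk1, ih (k + 1)]
    have hr : List.range' k (x :: rest).length = k :: List.range' (k + 1) rest.length := by
      simp [List.range'_succ]
    rw [hr, List.foldl_cons]
    have h0 : (x :: rest).getD (k - k) 0 = x := by simp
    rw [h0]
    refine (PySem.List.foldl_congr_mem _ _ _ _ ?_).symm
    intro acc c hc
    have hck : k + 1 ≤ c := (List.mem_range'_1.mp hc).1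
    have hgd : (x :: rest).getD (c - k) 0 = rest.getD (c - (k + 1)) 0 := by
      have h1 : c - k = (c - (k + 1)) + 1 := by omega
      rw [h1]
      simp
    rw [hgd]

theorem fold_enum0 (g : List Int → Int → Int → List Int) (raw init : List Int) :
    List.foldl (fun out cx => g out cx.1 cx.2) init (PySem.List.enumerate raw 0)
      = List.foldl (fun out (c : Nat) => g out (c : Int) (raw.getD c 0)) init (List.range' 0 raw.length) := by
  have h := fold_enum_eq_range g raw 0 init
  simpa using h

theorem flatMap_singleton_eq_map (l : List Nat) (g : Nat → Int) :
    l.flatMap (fun c => [g c]) = l.map g := by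
  induction l with
  | nil => rfl
  | cons x rest ih => simp [ih]


-- each specialised row function is the generic fold at its filter type
theorem rowNone_eq_G (raw prev : List Int) (bpp : Int) :
    pvRowNone raw prev bpp = List.foldl (pvGstep raw prev bpp 0) [] (List.range' 0 raw.length) := by
  have h : List.foldl (pvGstep raw prev bpp 0) [] (List.range' 0 raw.length)
      = List.foldl (fun out c => out ++ [PySem.Int.mod (raw.getD c 0) 256]) [] (List.range' 0 raw.length) := by
    exact PySem.List.foldl_congr_mem _ _ _ _ (fun acc c _ => by simp [pvGstep])
  rw [h, PySem.List.foldl_append_eq_flatMap, ← List.range_eq_range', flatMap_singleton_eq_map]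
  apply List.ext_getElem
  · simp [pvRowNone]
  · intro n h1 h2
    have hn : n < raw.length := by simpa [pvRowNone] using h1
    simp [pvRowNone, List.getD, hn]

theorem rowUp_eq_G (raw prev : List Int) (bpp : Int) (hlen : raw.length ≤ prev.length) :
    pvRowUp raw prev bpp = List.foldl (pvGstep raw prev bpp 2) [] (List.range' 0 raw.length) := by
  have h : List.foldl (pvGstep raw prev bpp 2) [] (List.range' 0 raw.length)
      = List.foldl (fun out c => out ++ [PySem.Int.mod (raw.getD c 0 + (PySem.List.pyGet? prev (c : Int)).getD 0) 256]) [] (List.range' 0 raw.length) := by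
    exact PySem.List.foldl_congr_mem _ _ _ _ (fun acc c _ => by simp [pvGstep])
  rw [h, PySem.List.foldl_append_eq_flatMap, ← List.range_eq_range', flatMap_singleton_eq_map]
  apply List.ext_getElem
  · simp [pvRowUp]
    omega
  · intro n h1 h2
    have hn : n < raw.length := by
      simp [pvRowUp] at h1
      omega
    have hnp : n < prev.length := lt_of_lt_of_le hn hlen
    simp [pvRowUp, List.getD, hn, hnp]

theorem rowSub_eq_G (raw prev : List Int) (bpp : Int) :
    pvRowSub raw prev bpp = List.foldl (pvGstep raw prev bpp 1) [] (List.range' 0 raw.length) := by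
  unfold pvRowSub
  rw [fold_enum0 (fun out i x =>
    out ++ [PySem.Int.mod (x + (if i ≥ bpp then (PySem.List.pyGet? out (i - bpp)).getD 0 else 0)) 256])]
  exact PySem.List.foldl_congr_mem _ _ _ _ (fun acc c _ => by simp [pvGstep])

theorem rowAvg_eq_G (raw prev : List Int) (bpp : Int) :
    pvRowAvg raw prev bpp = List.foldl (pvGstep raw prev bpp 3) [] (List.range' 0 raw.length) := by
  unfold pvRowAvg
  rw [fold_enum0 (fun out i x =>
    out ++ [PySem.Int.mod (x + PySem.Int.floordiv ((if i ≥ bpp then (PySem.List.pyGet? out (i - bpp)).getD 0 else 0) + (PySem.List.pyGet? prev i).getD 0) 2) 256])]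
  exact PySem.List.foldl_congr_mem _ _ _ _ (fun acc c _ => by simp [pvGstep])

theorem rowPaeth_eq_G (raw prev : List Int) (bpp : Int) :
    pvRowPaeth raw prev bpp = List.foldl (pvGstep raw prev bpp 4) [] (List.range' 0 raw.length) := by
  unfold pvRowPaeth
  rw [fold_enum0 (fun out i x =>
    let a := if i ≥ bpp then (PySem.List.pyGet? out (i - bpp)).getD 0 else 0
    let b := (PySem.List.pyGet? prev i).getD 0
    let cc := if i ≥ bpp then (PySem.List.pyGet? prev (i - bpp)).getD 0 else 0
    let p := a + b - cc
    let pa := |p - a|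
    let pb := |p - b|
    let pc := |p - cc|
    out ++ [PySem.Int.mod (x + (if pa ≤ pb ∧ pa ≤ pc then a else if pb ≤ pc then b else cc)) 256])]
  exact PySem.List.foldl_congr_mem _ _ _ _ (fun acc c _ => by simp [pvGstep, pvPaeth])

-- core invariant: A's inner fold over the flat recon list tracks the generic row fold
theorem pv_inner_eq (IDAT : List Int) (s : Nat) (bpp ft : Int) (hbpp : 0 ≤ bpp)
    (r : Nat) (prev flat raw : List Int) (i0 : Nat)
    (hlen : flat.length = r * s)
    (hplen : prev.length = s)
    (hp0 : r = 0 → prev = List.replicate s 0)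
    (hps : r ≠ 0 → ∃ rest, flat = rest ++ prev ∧ rest.length = (r - 1) * s)
    (hraw : ∀ j, j < s → raw.getD j 0 = IDAT.getD (i0 + j) 0) :
    ∀ (k c : Nat) (cur : List Int), cur.length = c → c + k ≤ s →
      List.foldl (pvAstep IDAT (s : Int) bpp ft r) (flat ++ cur, i0 + c) (List.range' c k)
      = (flat ++ List.foldl (pvGstep raw prev bpp ft) cur (List.range' c k), i0 + c + k) := by
  intro k
  induction k with
  | zero => intro c cur _ _; simp
  | succ k ih =>
    intro c cur hcur hcs
    have hc : c < s := by omega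
    have hbn : (bpp.toNat : Int) = bpp := Int.toNat_of_nonneg hbpp
    -- the three neighbour reads agree
    have ha : pvReconA (flat ++ cur) (s : Int) (r : Nat) (c : Nat) bpp
        = (if (c : Int) ≥ bpp then (PySem.List.pyGet? cur ((c : Int) - bpp)).getD 0 else 0) := by
      unfold pvReconA
      by_cases hge : (c : Int) ≥ bpp
      · rw [if_pos hge, if_pos hge]
        have hm : bpp.toNat ≤ c := by omega
        have h1 : (r : Int) * (s : Int) + (c : Nat) - bpp
            = ((r * s + (c - bpp.toNat) : Nat) : Int) := by push_cast [hm]; ring_nf; omega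
        have h2 : (c : Nat) - bpp = ((c - bpp.toNat : Nat) : Int) := by push_cast [hm]; omega
        rw [h1, h2, PySem.List.pyGet?_natCast, PySem.List.pyGet?_natCast]
        rw [List.getElem?_append_right (by omega)]
        have h3 : r * s + (c - bpp.toNat) - flat.length = c - bpp.toNat := by omega
        rw [h3]
      · rw [if_neg hge, if_neg hge]
    have hb : pvReconB (flat ++ cur) (s : Int) (r : Nat) (c : Nat)
        = (PySem.List.pyGet? prev (c : Nat)).getD 0 := by
      unfold pvReconB
      by_cases hr : r = 0
      · rw [if_neg (by simp [hr]), hp0 hr, PySem.List.pyGet?_natCast]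
        rw [List.getElem?_replicate, if_pos (by omega : c < s)]
        rfl
      · obtain ⟨rest, hfl, hrl⟩ := hps hr
        rw [if_pos (by exact_mod_cast Nat.pos_of_ne_zero hr)]
        have h1 : ((r : Nat) - 1) * (s : Int) + (c : Nat) = (((r - 1) * s + c : Nat) : Int) := by
          have hr1 : ((r : Int) - 1) = ((r - 1 : Nat) : Int) := by omega
          rw [hr1]; push_cast; ring
        rw [h1, PySem.List.pyGet?_natCast, PySem.List.pyGet?_natCast, hfl, List.append_assoc]
        rw [List.getElem?_append_right (by omega)]
        have h2 : (r - 1) * s + c - rest.length = c := by omega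
        rw [h2, List.getElem?_append_left (by omega)]
    have hcc : pvReconC (flat ++ cur) (s : Int) (r : Nat) (c : Nat) bpp
        = (if (c : Int) ≥ bpp then (PySem.List.pyGet? prev ((c : Int) - bpp)).getD 0 else 0) := by
      unfold pvReconC
      by_cases hge : (c : Int) ≥ bpp
      · have hm : bpp.toNat ≤ c := by omega
        have h2 : (c : Nat) - bpp = ((c - bpp.toNat : Nat) : Int) := by push_cast [hm]; omega
        by_cases hr : r = 0
        · rw [if_neg (by simp [hr]), if_pos hge, hp0 hr, h2, PySem.List.pyGet?_natCast]
          rw [List.getElem?_replicate, if_pos (by omega : c - bpp.toNat < s)]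
          rfl
        · obtain ⟨rest, hfl, hrl⟩ := hps hr
          rw [if_pos ⟨by exact_mod_cast Nat.pos_of_ne_zero hr, hge⟩, if_pos hge]
          have h1 : ((r : Nat) - 1) * (s : Int) + (c : Nat) - bpp
              = (((r - 1) * s + (c - bpp.toNat) : Nat) : Int) := by
            have hr1 : ((r : Int) - 1) = ((r - 1 : Nat) : Int) := by omega
            rw [hr1]; push_cast [hm]; ring_nf; omega
          rw [h1, h2, PySem.List.pyGet?_natCast, PySem.List.pyGet?_natCast, hfl, List.append_assoc]
          rw [List.getElem?_append_right (by omega)]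
          have h3 : (r - 1) * s + (c - bpp.toNat) - rest.length = c - bpp.toNat := by omega
          rw [h3, List.getElem?_append_left (by omega)]
      · rw [if_neg (by tauto), if_neg hge]
    have hfx : IDAT.getD (i0 + c) 0 = raw.getD c 0 := (hraw c hc).symm
    have hstep : pvAstep IDAT (s : Int) bpp ft r (flat ++ cur, i0 + c) c
        = (flat ++ pvGstep raw prev bpp ft cur c, i0 + c + 1) := by
      simp only [pvAstep, pvGstep]
      rw [ha, hb, hcc, hfx]
      simp [List.append_assoc]
    obtain ⟨e, hGst⟩ := pvGstep_shape raw prev bpp ft cur c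
    rw [List.range'_succ, List.foldl_cons, List.foldl_cons, hstep, hGst]
    have hrec := ih (c + 1) (cur ++ [e]) (by simp [hcur]) (by omega)
    have hi : i0 + c + 1 = i0 + (c + 1) := by omega
    rw [hi, hrec]
    simp only [Prod.mk.injEq, Nat.add_assoc]
    exact ⟨trivial, by omega⟩

-- fold-shape facts for stage 1 (parsing) and stage 2 (defiltering)
theorem parse_step (IDAT : List Int) (stride : Int) (acc : List (Int × List Int)) (i : Nat) (r : Nat) :
    pvParseRow IDAT stride (acc, i) r
      = (acc ++ [(IDAT.getD i 0, (List.range stride.toNat).map (fun c => IDAT.getD (i + 1 + c) 0))],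
         i + 1 + stride.toNat) := by
  simp [pvParseRow]

theorem parse_acc (IDAT : List Int) (stride : Int) :
    ∀ (l : List Nat) (acc : List (Int × List Int)) (i : Nat),
      List.foldl (pvParseRow IDAT stride) (acc, i) l
        = (acc ++ (List.foldl (pvParseRow IDAT stride) ([], i) l).1,
           (List.foldl (pvParseRow IDAT stride) ([], i) l).2) := by
  intro l
  induction l with
  | nil => intro acc i; simp
  | cons r rest ih =>
    intro acc i
    rw [List.foldl_cons, List.foldl_cons, parse_step, parse_step, ih, ih ([] ++ [_])]
    simp

theorem parse_len (IDAT : List Int) (stride : Int) :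
    ∀ (l : List Nat) (acc : List (Int × List Int)) (i : Nat),
      (List.foldl (pvParseRow IDAT stride) (acc, i) l).1.length = acc.length + l.length := by
  intro l
  induction l with
  | nil => intro acc i; simp
  | cons r rest ih =>
    intro acc i
    rw [List.foldl_cons, parse_step, ih]
    simp
    omega

theorem parse_raw_nil (IDAT : List Int) (stride : Int) (h0 : stride.toNat = 0) :
    ∀ (l : List Nat) (acc : List (Int × List Int)) (i : Nat),
      (∀ p ∈ acc, p.2 = ([] : List Int)) →
      ∀ p ∈ (List.foldl (pvParseRow IDAT stride) (acc, i) l).1, p.2 = ([] : List Int) := by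
  intro l
  induction l with
  | nil => intro acc i hacc; simpa using hacc
  | cons r rest ih =>
    intro acc i hacc
    rw [List.foldl_cons, parse_step]
    refine ih _ _ ?_
    intro p hp
    rcases List.mem_append.mp hp with h | h
    · exact hacc p h
    · simp [h0] at h
      simp [h]

theorem defilter_nil_rows (bpp : Int) :
    ∀ (sls : List (Int × List Int)), (∀ p ∈ sls, p.2 = ([] : List Int)) →
      ∀ (st : List Int × List Int), (List.foldl (pvDefilterRow bpp) st sls).1 = st.1 := by
  intro sls
  induction sls with
  | nil => intro _ st; rfl
  | cons sl rest ih =>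
    intro hsl st
    rcases sl with ⟨f1, raw1⟩
    have h2 : raw1 = [] := by simpa using hsl (f1, raw1) List.mem_cons_self
    subst h2
    have hrow : pvDefilterRow bpp st (f1, ([] : List Int)) = (st.1, ([] : List Int)) := by
      simp only [pvDefilterRow]
      split_ifs <;>
        simp [pvRowNone, pvRowSub, pvRowUp, pvRowAvg, pvRowPaeth, PySem.List.enumerate_nil]
    rw [List.foldl_cons, hrow]
    exact ih (fun p hp => hsl p (List.mem_cons_of_mem _ hp)) (st.1, [])

theorem arow_nil (IDAT : List Int) (stride bpp : Int) (h0 : stride.toNat = 0) :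
    ∀ (l : List Nat) (st : List Int × Nat),
      (List.foldl (pvArow IDAT stride bpp) st l).1 = st.1 := by
  intro l
  induction l with
  | nil => intro st; rfl
  | cons r rest ih =>
    intro st
    rw [List.foldl_cons]
    have h : pvArow IDAT stride bpp st r = (st.1, st.2 + 1) := by
      simp [pvArow, h0]
    rw [h, ih]

-- outer invariant: A's flat result is the defiltered concatenation of the parsed scanlines
theorem pv_outer_eq (IDAT : List Int) (s : Nat) (bpp : Int) (hbpp : 0 ≤ bpp) :
    ∀ (n r : Nat) (flat prev : List Int),
      flat.length = r * s →
      prev.length = s →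
      (r = 0 → prev = List.replicate s 0) →
      (r ≠ 0 → ∃ rest, flat = rest ++ prev ∧ rest.length = (r - 1) * s) →
      (∀ j, r ≤ j → j < r + n →
        0 ≤ IDAT.getD (j * (1 + s)) 0 ∧ IDAT.getD (j * (1 + s)) 0 ≤ 4) →
      (List.foldl (pvArow IDAT (s : Int) bpp) (flat, r * (1 + s)) (List.range' r n)).1
        = (List.foldl (pvDefilterRow bpp) (flat, prev)
            (List.foldl (pvParseRow IDAT (s : Int)) ([], r * (1 + s)) (List.range' r n)).1).1 := by
  intro n
  induction n with
  | zero => intro r flat prev _ _ _ _ _; simp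
  | succ n ih =>
    intro r flat prev hlen hplen hp0 hps hft
    rw [List.range'_succ, List.foldl_cons, List.foldl_cons]
    set i := r * (1 + s) with hi
    set ft := IDAT.getD i 0 with hftdef
    set raw := (List.range s).map (fun c => IDAT.getD (i + 1 + c) 0) with hrawdef
    have hrawlen : raw.length = s := by simp [hrawdef]
    have hraw : ∀ j, j < s → raw.getD j 0 = IDAT.getD (i + 1 + j) 0 := by
      intro j hj
      simp [hrawdef, List.getD, hj]
    have hrow5 : ft = 0 ∨ ft = 1 ∨ ft = 2 ∨ ft = 3 ∨ ft = 4 := by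
      have h5 := hft r le_rfl (by omega)
      rw [← hi] at h5
      rw [hftdef]
      omega
    set row := if ft = 0 then pvRowNone raw prev bpp
      else if ft = 1 then pvRowSub raw prev bpp
      else if ft = 2 then pvRowUp raw prev bpp
      else if ft = 3 then pvRowAvg raw prev bpp
      else if ft = 4 then pvRowPaeth raw prev bpp
      else [] with hrowdef
    have hrowG : row = List.foldl (pvGstep raw prev bpp ft) [] (List.range' 0 s) := by
      rcases hrow5 with h | h | h | h | h
      · rw [hrowdef, if_pos h, h, ← hrawlen, rowNone_eq_G]
      · rw [hrowdef, if_neg (by omega), if_pos h, h, ← hrawlen, rowSub_eq_G]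
      · rw [hrowdef, if_neg (by omega), if_neg (by omega), if_pos h, h, ← hrawlen,
          rowUp_eq_G raw prev bpp (by omega)]
      · rw [hrowdef, if_neg (by omega), if_neg (by omega), if_neg (by omega), if_pos h, h, ← hrawlen, rowAvg_eq_G]
      · rw [hrowdef, if_neg (by omega), if_neg (by omega), if_neg (by omega), if_neg (by omega),
          if_pos h, h, ← hrawlen, rowPaeth_eq_G]
    have hrowlen : row.length = s := by
      rw [hrowG, pvG_len]
      simp
    have hinner := pv_inner_eq IDAT s bpp ft hbpp r prev flat raw (i + 1)
      hlen hplen hp0 hps (fun j hj => hraw j hj) s 0 [] rfl (by omega)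
    simp only [List.append_nil, Nat.add_zero] at hinner
    have hA : pvArow IDAT (s : Int) bpp (flat, i) r = (flat ++ row, i + 1 + s) := by
      show List.foldl (pvAstep IDAT (s : Int) bpp (IDAT.getD i 0) r) (flat, i + 1)
          (List.range (s : Int).toNat) = (flat ++ row, i + 1 + s)
      rw [← hftdef, Int.toNat_natCast, List.range_eq_range', hinner, hrowG]
    have hP : pvParseRow IDAT (s : Int) (([] : List (Int × List Int)), i) r
        = ([(ft, raw)], i + 1 + s) := by
      show (([] : List (Int × List Int)) ++ [(IDAT.getD i 0, (List.range (s : Int).toNat).map _)],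
        i + 1 + ((List.range (s : Int).toNat).map _).length) = _
      rw [← hftdef, Int.toNat_natCast, ← hrawdef]
      simp [hrawlen]
    have hD : pvDefilterRow bpp (flat, prev) (ft, raw) = (flat ++ row, row) := by
      simp only [pvDefilterRow]
      rw [← hrowdef]
    rw [hA, hP, parse_acc, List.foldl_append, List.foldl_cons, List.foldl_nil, hD]
    have hi1 : i + 1 + s = (r + 1) * (1 + s) := by rw [hi]; ring
    rw [hi1]
    exact ih (r + 1) (flat ++ row) row
      (by simp [hlen, hrowlen]; ring)
      hrowlen
      (by omega)
      (fun _ => ⟨flat, rfl, by simpa using hlen⟩)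
      (fun j hj1 hj2 => hft j (by omega) (by omega))

-- ===== VERDICT (by name: the statement is the Claim_ definition above) =====
theorem get_IDATA_pixel_spec : Claim_equal_get_IDATA_pixel := by
  intro IDAT width height bpp _ hpre
  show get_IDATA_pixel IDAT width height bpp = get_IDATA_pixel_alt IDAT width height bpp
  rcases hpre with hh | ⟨hsn, hlen2, hft2⟩ | ⟨hw, hb, hlen, hft⟩
  · have h0 : height.toNat = 0 := Int.toNat_of_nonpos hh
    simp [get_IDATA_pixel, get_IDATA_pixel_alt, h0]
  · -- stride ≤ 0: every scanline is empty, both sides return []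
    have h0 : (width * bpp).toNat = 0 := Int.toNat_of_nonpos hsn
    show (List.foldl (pvArow IDAT (width * bpp) bpp) ([], 0) (List.range height.toNat)).1
        = (if (List.foldl (pvParseRow IDAT (width * bpp)) ([], 0) (List.range height.toNat)).1 = []
            then []
            else (List.foldl (pvDefilterRow bpp) ([], List.replicate (width * bpp).toNat 0)
              (List.foldl (pvParseRow IDAT (width * bpp)) ([], 0) (List.range height.toNat)).1).1)
    rw [arow_nil IDAT (width * bpp) bpp h0]
    split_ifs with hg
    · rfl
    · rw [defilter_nil_rows bpp _
        (parse_raw_nil IDAT (width * bpp) h0 (List.range height.toNat) [] 0 (by simp))]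
  · have hs : width * bpp = (((width * bpp).toNat : Nat) : Int) :=
      (Int.toNat_of_nonneg (mul_nonneg hw hb)).symm
    set s := (width * bpp).toNat with hsdef
    show (List.foldl (pvArow IDAT (width * bpp) bpp) ([], 0) (List.range height.toNat)).1
        = (if (List.foldl (pvParseRow IDAT (width * bpp)) ([], 0) (List.range height.toNat)).1 = []
            then []
            else (List.foldl (pvDefilterRow bpp) ([], List.replicate (width * bpp).toNat 0)
              (List.foldl (pvParseRow IDAT (width * bpp)) ([], 0) (List.range height.toNat)).1).1)
    rw [hs, List.range_eq_range', Int.toNat_natCast]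
    have hout := pv_outer_eq IDAT s bpp hb height.toNat 0 [] (List.replicate s 0)
      (by simp) (by simp) (fun _ => rfl) (fun h => absurd rfl h)
      (by
        intro j hj1 hj2
        have hmem : j ∈ List.range height.toNat := List.mem_range.mpr (by omega)
        exact hft j hmem)
    by_cases hc : (List.foldl (pvParseRow IDAT ((s : Nat) : Int)) ([], 0)
        (List.range' 0 height.toNat)).1 = []
    · rw [if_pos hc]
      have hl := parse_len IDAT ((s : Nat) : Int) (List.range' 0 height.toNat) [] 0
      rw [hc] at hl
      simp at hl
      have hh0 : height.toNat = 0 := by omega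
      rw [hh0]
      simp
    · rw [if_neg hc]
      simpa using hout
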